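-- pv_equiv track=rewrite | github.com/kokikurozu/compro | atcoder便利ツール/コンビネーションの工夫.py | cmb2
-- ===== SOURCE A (Python) =====
-- def cmb2(n, r, mod):
--     bunbo = 1
--     bunshi = 1
--     r = min(r, n - r)
--     for i in range(r):
--         bunshi = (bunshi * (n - i)) % mod
--         bunbo = (bunbo * pow(i+1,mod-2,mod)) % mod
--     return (bunbo * bunshi) % mod
-- ===== SOURCE B (Python) =====
-- def _fall(lo, hi, mod):
--     # product of the integers in [lo, hi), reduced mod `mod`, by divide and conquer
--     if hi - lo <= 0:
--         return 1 % mod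
--     if hi - lo == 1:
--         return lo % mod
--     mid = (lo + hi) // 2
--     return _fall(lo, mid, mod) * _fall(mid, hi, mod) % mod
--
-- def cmb2(n, r, mod):
--     k = min(r, n - r)
--     if k <= 0:
--         return 1 % mod
--     return _fall(n - k + 1, n + 1, mod) * pow(_fall(1, k + 1, mod), mod - 2, mod) % mod
-- ===== Notes on version B (the rewrite author's own statement) =====
-- stated objective: faster
-- what changed: A runs a single loop computing a modular inverse pow(i+1, mod-2, mod) in every iteration; B has no loop at all: it computes the numerator and denominator range products by a divide-and-conquer recursion (reducing mod at each combine) and performs one single modular-inverse pow on the accumulated denominator.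
-- outside the precondition, e.g. on cmb2(5, 2, -7): A returns -1, B returns -1
import Mathlib
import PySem

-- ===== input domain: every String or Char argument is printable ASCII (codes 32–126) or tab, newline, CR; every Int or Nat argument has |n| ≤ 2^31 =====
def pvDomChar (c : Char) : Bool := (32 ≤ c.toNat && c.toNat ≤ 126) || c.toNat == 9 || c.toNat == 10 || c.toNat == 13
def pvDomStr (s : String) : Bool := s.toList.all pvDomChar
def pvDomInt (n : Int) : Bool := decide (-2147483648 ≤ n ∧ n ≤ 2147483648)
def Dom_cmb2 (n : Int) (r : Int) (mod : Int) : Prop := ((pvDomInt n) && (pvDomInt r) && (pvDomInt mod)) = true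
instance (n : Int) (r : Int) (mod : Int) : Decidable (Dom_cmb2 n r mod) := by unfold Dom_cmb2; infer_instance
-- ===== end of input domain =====

-- B replaces A's per-iteration modular-inverse pow (and its accumulator loop) with two
-- divide-and-conquer range products and a single pow at the end (objective: faster —
-- one O(log mod) exponentiation instead of r of them).


-- ===== PORT A =====
-- Python's three-argument pow(b, e, m).  A negative exponent asks for a modular inverse; inside
-- Pre_cmb2 a negative exponent is reached only with m = 1 (Python returns 0 = 1 % 1) or on a
-- base ≡ 1 (Python returns 1 % m), so `1 % m` is exact there.
-- square-and-multiply modular exponentiation: the algorithm CPython's pow(b, e, m) runs for e ≥ 0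
-- (PySem.Int.powMod's definition (b ^ e) % m is the same value but is not feasible to evaluate here)
def powModAux (b : Int) (e : Nat) (m : Int) : Int :=
  if e = 0 then PySem.Int.mod 1 m
  else
    let h := powModAux b (e / 2) m
    if e % 2 = 0 then PySem.Int.mod (h * h) m
    else PySem.Int.mod (PySem.Int.mod (h * h) m * b) m

def pyPow3 (b : Int) (e : Int) (m : Int) : Int :=
  if 0 ≤ e then powModAux b e.toNat m
  else PySem.Int.mod 1 m

def cmb2 (n : Int) (r : Int) (mod : Int) : Int :=
  let r' := min r (n - r)
  let st := (PySem.List.pyRange 0 r' 1).foldl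
    (fun (st : Int × Int) i =>
      (PySem.Int.mod (st.1 * pyPow3 (i + 1) (mod - 2) mod) mod,
       PySem.Int.mod (st.2 * (n - i)) mod)) (1, 1)
  PySem.Int.mod (st.1 * st.2) mod

-- ===== PORT B =====
-- lemma needed by fallMod's own termination proof (cited in its decreasing_by)
lemma fallMod_mid_bounds (lo hi : Int) (h : 2 ≤ hi - lo) :
    lo + 1 ≤ PySem.Int.floordiv (lo + hi) 2 ∧ PySem.Int.floordiv (lo + hi) 2 ≤ hi - 1 := by
  have := PySem.Int.floordiv_two_mid_bounds (lo := lo + 1) (hi := hi - 1) (by omega)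
  rw [show lo + 1 + (hi - 1) = lo + hi by ring] at this
  exact this

-- product of the integers in [lo, hi) reduced mod m, by divide and conquer
def fallMod (lo hi m : Int) : Int :=
  if hi - lo ≤ 0 then PySem.Int.mod 1 m
  else if hi - lo = 1 then PySem.Int.mod lo m
  else
    let mid := PySem.Int.floordiv (lo + hi) 2
    PySem.Int.mod (fallMod lo mid m * fallMod mid hi m) m
termination_by (hi - lo).toNat
decreasing_by
  · have := fallMod_mid_bounds lo hi (by omega)
    omega
  · have := fallMod_mid_bounds lo hi (by omega)
    omega

def cmb2_alt (n : Int) (r : Int) (mod : Int) : Int :=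
  let k := min r (n - r)
  if k ≤ 0 then PySem.Int.mod 1 mod
  else
    PySem.Int.mod
      (fallMod (n - k + 1) (n + 1) mod *
        pyPow3 (fallMod 1 (k + 1) mod) (mod - 2) mod) mod

-- ===== PRECONDITION & SPEC =====
-- Pre_ excludes mod = 0, where A raises ZeroDivisionError, and negative mod with a non-empty loop,
-- where A raises ValueError whenever some factor in 1..min(r, n-r) shares a divisor with mod
-- (pow with a negative exponent); the negative-mod inputs on which A happens to return are excluded
-- with that region because A's raise condition there is not expressible without scanning the range.
def Pre_cmb2 (n : Int) (r : Int) (mod : Int) : Prop :=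
  mod ≠ 0 ∧ (0 < mod ∨ min r (n - r) ≤ 0)
instance (n : Int) (r : Int) (mod : Int) : Decidable (Pre_cmb2 n r mod) := by
  unfold Pre_cmb2; infer_instance

def pvWitness_cmb2 : Int × Int × Int := (5, 2, 7)

def Spec_cmb2 (n : Int) (r : Int) (mod : Int) (out : Int) : Prop := out = cmb2_alt n r mod
instance (n : Int) (r : Int) (mod : Int) (out : Int) : Decidable (Spec_cmb2 n r mod out) := by unfold Spec_cmb2; infer_instance

-- ===== CLAIM (what is proved, stated in full; the proofs are below) =====
def Claim_equal_cmb2 : Prop := ∀ (n : Int) (r : Int) (mod : Int), Dom_cmb2 n r mod → Pre_cmb2 n r mod → Spec_cmb2 n r mod (cmb2 n r mod)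

-- ===== LEMMAS AND PROOFS =====

-- A's loop step (after mod → emod for 0 < mod and pow unfolded), reindexed over j = 0,1,…
def stepA (n m : Int) (e : Nat) (st : Int × Int) (j : Nat) : Int × Int :=
  (st.1 * (((j : Int) + 1) ^ e % m) % m, st.2 * (n - (j : Int)) % m)

-- the exact factorial and falling-factorial products both programs chase
def Fpr (t : Nat) : Int := ((List.range t).map (fun (j : Nat) => (j : Int) + 1)).prod
def Npr (n : Int) (t : Nat) : Int := ((List.range t).map (fun (j : Nat) => n - (j : Int))).prod

-- loop invariant for A: bunbo ≡ (t!)^e and bunshi ≡ n(n-1)…(n-t+1)  (mod m)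
lemma Fpr_succ (t : Nat) : Fpr (t + 1) = Fpr t * ((t : Int) + 1) := by
  simp [Fpr, List.range_succ]

lemma Npr_succ (n : Int) (t : Nat) : Npr n (t + 1) = Npr n t * (n - (t : Int)) := by
  simp [Npr, List.range_succ]

lemma foldA_inv (n m : Int) (e : Nat) (t : Nat) :
    ((List.range t).foldl (stepA n m e) (1, 1)).1 ≡ (Fpr t) ^ e [ZMOD m]
    ∧ ((List.range t).foldl (stepA n m e) (1, 1)).2 ≡ Npr n t [ZMOD m] := by
  induction t with
  | zero => simp [Fpr, Npr, Int.ModEq.refl]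
  | succ t ih =>
    obtain ⟨h1, h2⟩ := ih
    rw [List.range_succ, List.foldl_append, List.foldl_cons, List.foldl_nil]
    constructor
    · show _ * (((t : Int) + 1) ^ e % m) % m ≡ _ [ZMOD m]
      rw [Fpr_succ, mul_pow]
      exact (Int.emod_emod_of_dvd _ dvd_rfl).trans
        (Int.ModEq.mul h1 (Int.emod_emod_of_dvd _ dvd_rfl))
    · show _ * (n - (t : Int)) % m ≡ _ [ZMOD m]
      rw [Npr_succ]
      exact (Int.emod_emod_of_dvd _ dvd_rfl).trans (Int.ModEq.mul h2 (Int.ModEq.refl _))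

-- powModAux computes b ^ e mod m (for a positive modulus)
lemma powModAux_eq (b : Int) (e : Nat) (m : Int) (hm : 0 < m) :
    powModAux b e m = (b ^ e) % m := by
  induction e using Nat.strong_induction_on with
  | _ e ih =>
    rcases Nat.eq_zero_or_pos e with h0 | hpos'
    · rw [powModAux]
      simp [h0, PySem.Int.mod_eq_emod_of_pos hm]
    · have hlt : e / 2 < e := Nat.div_lt_self hpos' (by omega)
      have hsq : (b ^ (e / 2) % m) * (b ^ (e / 2) % m) % m = b ^ (e / 2 + e / 2) % m := by
        rw [← Int.mul_emod, ← pow_add]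
      rw [powModAux, if_neg (by omega)]
      simp only [ih _ hlt, PySem.Int.mod_eq_emod_of_pos hm]
      rcases Nat.even_or_odd e with he | he
      · rw [if_pos (Nat.even_iff.mp he), hsq, show e / 2 + e / 2 = e from by
          have := Nat.even_iff.mp he; omega]
      · have h2 := Nat.odd_iff.mp he
        rw [if_neg (by omega), hsq, Int.mul_emod, Int.emod_emod_of_dvd _ dvd_rfl,
          ← Int.mul_emod, ← pow_succ, show e / 2 + e / 2 + 1 = e from by omega]

lemma mod_one_eq_zero (x : Int) : PySem.Int.mod x 1 = 0 := by
  rw [PySem.Int.mod_eq_emod_of_pos one_pos, Int.emod_one]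

-- fallMod computes the exact range product reduced mod m (positive modulus)
lemma fallMod_eq (m : Int) (hm : 0 < m) : ∀ (lo hi : Int),
    fallMod lo hi m = (((List.range (hi - lo).toNat).map (fun (j : Nat) => lo + (j : Int))).prod) % m := by
  intro lo hi
  induction lo, hi using fallMod.induct with
  | case1 lo hi h =>
    rw [fallMod, if_pos h, show (hi - lo).toNat = 0 by omega]
    simp [PySem.Int.mod_eq_emod_of_pos hm]
  | case2 lo hi h h1 =>
    rw [fallMod, if_neg h, if_pos h1, show (hi - lo).toNat = 1 by omega]
    simp [PySem.Int.mod_eq_emod_of_pos hm]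
  | case3 lo hi h h1 mid ih1 ih2 =>
    rw [fallMod, if_neg h, if_neg h1]
    have hb := fallMod_mid_bounds lo hi (by omega)
    have ht : (hi - lo).toNat = (mid - lo).toNat + (hi - mid).toNat := by omega
    rw [PySem.Int.mod_eq_emod_of_pos hm, ih1, ih2, ← Int.mul_emod, ht,
      List.range_add, List.map_append, List.prod_append]
    congr 2
    rw [List.map_map]
    apply congrArg
    apply List.map_congr_left
    intro j _
    show mid + (j : Int) = ((fun (j : Nat) => lo + (j : Int)) ∘ fun x => (mid - lo).toNat + x) j
    show mid + (j : Int) = lo + (((mid - lo).toNat + j : Nat) : Int)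
    push_cast
    omega

-- the two falling-factorial orders give the same exact product
lemma fall_shift (n : Int) (K : Nat) :
    ((List.range K).map (fun (j : Nat) => (n - (K : Int) + 1) + (j : Int))).prod = Npr n K := by
  have hl : ∀ (f : ℕ → ℤ), ((List.range K).map f).prod = ∏ i ∈ Finset.range K, f i :=
    fun f => rfl
  rw [Npr, hl, hl, ← Finset.prod_range_reflect (fun (j : Nat) => n - (j : Int)) K]
  apply Finset.prod_congr rfl
  intro j hj
  have hjK : j < K := Finset.mem_range.mp hj
  have : ((K - 1 - j : Nat) : Int) = (K : Int) - 1 - j := by omega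
  rw [this]
  ring

lemma fact_shift (K : Nat) :
    ((List.range K).map (fun (j : Nat) => 1 + (j : Int))).prod = Fpr K := by
  rw [Fpr]
  apply congrArg
  apply List.map_congr_left
  intro j _
  ring

-- ===== VERDICT (by name: the statement is the Claim_ definition above) =====
theorem cmb2_spec : Claim_equal_cmb2 := by
  unfold Claim_equal_cmb2
  intro n r mod _ hpre
  obtain ⟨hm0, hcase⟩ := hpre
  unfold Spec_cmb2
  simp only [cmb2, cmb2_alt]
  by_cases hk : min r (n - r) ≤ 0
  · -- empty loop / early return: both sides are 1 % mod
    rw [if_pos hk, PySem.List.pyRange_one,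
      show ((min r (n - r)) - 0).toNat = 0 by omega]
    simp only [List.range_zero, List.map_nil, List.foldl_nil, mul_one]
  · have hk' : 0 < min r (n - r) := by omega
    have hpos : 0 < mod := by
      rcases hcase with h | h
      · exact h
      · omega
    rw [if_neg hk]
    rcases eq_or_lt_of_le (by omega : (1 : Int) ≤ mod) with h1 | h2
    · -- mod = 1 : both final results are x % 1 = 0
      rw [← h1]
      simp only [mod_one_eq_zero]
    · -- 2 ≤ mod : the main case
      have he : 0 ≤ mod - 2 := by omega
      set k := min r (n - r) with hkdef
      set K := k.toNat with hK
      have hkK : (K : Int) = k := by omega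
      -- A's side: unfold the range and identify the fold with stepA
      rw [PySem.List.pyRange_one, show (k - 0) = k by ring]
      simp only [List.foldl_map, pyPow3, if_pos he, powModAux_eq _ _ _ hpos,
        PySem.Int.mod_eq_emod_of_pos hpos]
      have hfa : (fun (x : Int × Int) (y : Nat) =>
            (x.1 * ((0 + (y : Int) + 1) ^ (mod - 2).toNat % mod) % mod,
             x.2 * (n - (0 + (y : Int))) % mod)) = stepA n mod (mod - 2).toNat := by
        funext st j
        simp only [stepA, zero_add]
      rw [hfa]
      obtain ⟨h1, h2⟩ := foldA_inv n mod (mod - 2).toNat K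
      -- B's side: the two fallMod values
      rw [fallMod_eq mod hpos, fallMod_eq mod hpos,
        show (n + 1 - (n - k + 1)).toNat = K by omega,
        show (k + 1 - 1).toNat = K by omega]
      have hnum : ((List.range K).map (fun (j : Nat) => (n - k + 1) + (j : Int))).prod = Npr n K := by
        rw [← hkK]
        exact fall_shift n K
      rw [hnum, fact_shift]
      -- combine through one eventual emod
      have hB : (Fpr K % mod) ^ (mod - 2).toNat % mod ≡ (Fpr K) ^ (mod - 2).toNat [ZMOD mod] :=
        (Int.emod_emod_of_dvd _ dvd_rfl).trans
          (Int.ModEq.pow _ (Int.emod_emod_of_dvd _ dvd_rfl).symm).symm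
      calc ((List.range K).foldl (stepA n mod (mod - 2).toNat) (1, 1)).1
            * ((List.range K).foldl (stepA n mod (mod - 2).toNat) (1, 1)).2 % mod
          = Npr n K % mod * ((Fpr K % mod) ^ (mod - 2).toNat % mod) % mod := by
            apply Int.ModEq.eq
            calc _ ≡ (Fpr K) ^ (mod - 2).toNat * Npr n K [ZMOD mod] := Int.ModEq.mul h1 h2
              _ = Npr n K * (Fpr K) ^ (mod - 2).toNat := mul_comm _ _
              _ ≡ Npr n K % mod * ((Fpr K % mod) ^ (mod - 2).toNat % mod) [ZMOD mod] :=
                  Int.ModEq.mul (Int.emod_emod_of_dvd _ dvd_rfl).symm hB.symm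
        _ = _ := rfl
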